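-- pv_equiv track=rewrite | github.com/lindenau-dominika/szer | algorithm.py | calculate_Lmax
-- ===== SOURCE A (Python) =====
-- def calculate_Lmax(order, tasks_data, setup_times):
--     n = len(order)
--     C = [0] * n  # Czas zakończenia dla każdego zadania
--     L = [0] * n  # Spóźnienie dla każdego zadania
--
--     for i in range(n):
--         task_index = order[i]
--         processing_time = tasks_data[task_index][0]
--         due_date = tasks_data[task_index][1]
--         setup_time = setup_times[order[i - 1]][task_index] if i > 0 else 0
--         C[i] = (C[i - 1] if i > 0 else 0) + processing_time + setup_time
--         L[i] = max(0, C[i] - due_date)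
--
--     return max(L)
-- ===== SOURCE B (Python) =====
-- def calculate_Lmax(order, tasks_data, setup_times):
--     # Backward scan: f(i) = inc_i + max(-d_i, f(i+1)) is the maximum, over tasks k >= i,
--     # of (sum of increments from i to k) - d_k; the answer is max(0, f(0)).
--     # No completion times are ever materialized.
--     pairs = list(zip([None] + order[:-1], order))  # (predecessor, task)
--     best = None
--     for prev, t in reversed(pairs):
--         inc = tasks_data[t][0] + (setup_times[prev][t] if prev is not None else 0)
--         neg_d = -tasks_data[t][1]
--         best = inc + (neg_d if best is None else max(neg_d, best))
--     return max(0, best)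
-- ===== Notes on version B (the rewrite author's own statement) =====
-- stated objective: alternative
-- what changed: Replaced the forward index loop that fills completion-time and lateness arrays plus a separate max() pass by a backward scan over (predecessor, task) pairs using the suffix recurrence f(i) = inc_i + max(-d_i, f(i+1)); completion times are never materialized and the answer is max(0, f(0)).
import Mathlib
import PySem

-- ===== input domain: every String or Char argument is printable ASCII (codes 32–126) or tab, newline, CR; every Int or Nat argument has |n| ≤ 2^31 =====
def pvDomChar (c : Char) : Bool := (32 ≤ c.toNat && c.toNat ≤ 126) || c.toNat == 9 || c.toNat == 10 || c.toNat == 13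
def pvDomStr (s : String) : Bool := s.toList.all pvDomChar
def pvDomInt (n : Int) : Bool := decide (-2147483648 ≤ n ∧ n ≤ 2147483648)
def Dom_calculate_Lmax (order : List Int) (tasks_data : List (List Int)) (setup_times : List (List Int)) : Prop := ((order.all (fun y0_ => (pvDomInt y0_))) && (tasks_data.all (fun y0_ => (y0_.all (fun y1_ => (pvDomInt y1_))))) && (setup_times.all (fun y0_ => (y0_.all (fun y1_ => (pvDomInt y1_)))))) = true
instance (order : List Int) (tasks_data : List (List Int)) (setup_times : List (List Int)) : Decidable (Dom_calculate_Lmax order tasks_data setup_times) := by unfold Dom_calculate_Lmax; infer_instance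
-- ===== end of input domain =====

-- B replaces A's forward index loop (C/L arrays + a separate max pass) by a backward scan over
-- (predecessor, task) pairs using the suffix recurrence f(i) = inc_i + max(-d_i, f(i+1));
-- completion times are never materialized and the answer is max(0, f(0)).

-- ===== PORT A =====
-- A-side helper: the body of A's `for i in range(n)` loop, verbatim (state = the (C, L) arrays).
def calc_step (order : List Int) (tasks_data : List (List Int)) (setup_times : List (List Int))
    (st : List Int × List Int) (i : Int) : List Int × List Int :=
  let task_index := PySem.List.pyGetD order i 0
  let processing_time := PySem.List.pyGetD (PySem.List.pyGetD tasks_data task_index []) 0 0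
  let due_date := PySem.List.pyGetD (PySem.List.pyGetD tasks_data task_index []) 1 0
  let setup_time := if 0 < i then
      PySem.List.pyGetD (PySem.List.pyGetD setup_times (PySem.List.pyGetD order (i - 1) 0) []) task_index 0
    else 0
  let Ci := (if 0 < i then PySem.List.pyGetD st.1 (i - 1) 0 else 0) + processing_time + setup_time
  let Li := max 0 (Ci - due_date)
  (PySem.List.pySetD st.1 i Ci, PySem.List.pySetD st.2 i Li)

def calculate_Lmax (order : List Int) (tasks_data : List (List Int)) (setup_times : List (List Int)) : Int :=
  let n := order.length
  let st := (PySem.List.pyRange 0 (n : Int) 1).foldl (calc_step order tasks_data setup_times)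
              (List.replicate n (0 : Int), List.replicate n (0 : Int))
  (PySem.List.max? st.2 (fun y => y)).getD 0   -- max(L); Pre_ gives order ≠ [], so the list is nonempty

-- ===== PORT B =====
-- B-side helper: the body of B's `for prev, t in reversed(pairs)` loop (best = the running suffix value).
def alt_step (tasks_data : List (List Int)) (setup_times : List (List Int))
    (best : Option Int) (pr : Option Int × Int) : Option Int :=
  let inc := PySem.List.pyGetD (PySem.List.pyGetD tasks_data pr.2 []) 0 0 +
    (match pr.1 with
     | some prev => PySem.List.pyGetD (PySem.List.pyGetD setup_times prev []) pr.2 0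
     | none => 0)
  let neg_d := - PySem.List.pyGetD (PySem.List.pyGetD tasks_data pr.2 []) 1 0
  some (inc + (match best with | none => neg_d | some b => max neg_d b))

def calculate_Lmax_alt (order : List Int) (tasks_data : List (List Int)) (setup_times : List (List Int)) : Int :=
  -- pairs = list(zip([None] + order[:-1], order));  order[:-1] is dropLast
  let pairs := ((none :: order.dropLast.map some).zip order : List (Option Int × Int))
  -- `for … in reversed(pairs): best = step(best, …)` is a right fold
  let best := pairs.foldr (fun pr acc => alt_step tasks_data setup_times acc pr) none
  max 0 (best.getD 0)   -- max(0, best); Pre_ gives order ≠ [], so best is not None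

-- ===== PRECONDITION & SPEC =====
-- Pre_ excludes exactly the inputs where Python A raises: empty order (max([]) → ValueError) and
-- out-of-range indices (order entries not valid indices into tasks_data / setup_times rows,
-- or a tasks_data row with fewer than 2 entries → IndexError).
def Pre_calculate_Lmax (order : List Int) (tasks_data : List (List Int)) (setup_times : List (List Int)) : Prop :=
  order ≠ [] ∧
  (∀ t ∈ order, PySem.Raise.InRange tasks_data.length t ∧ 2 ≤ (PySem.List.pyGetD tasks_data t []).length) ∧
  (∀ pr ∈ order.zip order.tail, PySem.Raise.InRange setup_times.length pr.1 ∧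
      PySem.Raise.InRange (PySem.List.pyGetD setup_times pr.1 []).length pr.2)
instance (order : List Int) (tasks_data : List (List Int)) (setup_times : List (List Int)) : Decidable (Pre_calculate_Lmax order tasks_data setup_times) := by unfold Pre_calculate_Lmax; infer_instance

def pvWitness_calculate_Lmax : List Int × List (List Int) × List (List Int) :=
  ([0, 1], [[3, 2], [1, 5]], [[0, 4], [2, 0]])

def Spec_calculate_Lmax (order : List Int) (tasks_data : List (List Int)) (setup_times : List (List Int)) (out : Int) : Prop := out = calculate_Lmax_alt order tasks_data setup_times
instance (order : List Int) (tasks_data : List (List Int)) (setup_times : List (List Int)) (out : Int) : Decidable (Spec_calculate_Lmax order tasks_data setup_times out) := by unfold Spec_calculate_Lmax; infer_instance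

-- ===== CLAIM (what is proved, stated in full; the proofs are below) =====
def Claim_equal_calculate_Lmax : Prop := ∀ (order : List Int) (tasks_data : List (List Int)) (setup_times : List (List Int)), Dom_calculate_Lmax order tasks_data setup_times → Pre_calculate_Lmax order tasks_data setup_times → Spec_calculate_Lmax order tasks_data setup_times (calculate_Lmax order tasks_data setup_times)

-- ===== LEMMAS AND PROOFS =====

-- Index-based scalar description of the schedule: pvG j = order[j], pvC j = completion time of
-- the j-th scheduled task, pvGk j = its (unclamped) lateness, pvL j = its clamped lateness.
def pvG (order : List Int) (j : Nat) : Int := order.getD j 0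
def pvP (tasks_data : List (List Int)) (t : Int) : Int :=
  PySem.List.pyGetD (PySem.List.pyGetD tasks_data t []) 0 0
def pvDd (tasks_data : List (List Int)) (t : Int) : Int :=
  PySem.List.pyGetD (PySem.List.pyGetD tasks_data t []) 1 0
def pvS (setup_times : List (List Int)) (a b : Int) : Int :=
  PySem.List.pyGetD (PySem.List.pyGetD setup_times a []) b 0
def pvC (order : List Int) (tasks_data : List (List Int)) (setup_times : List (List Int)) : Nat → Int
  | 0 => pvP tasks_data (pvG order 0)
  | k + 1 => pvC order tasks_data setup_times k + pvP tasks_data (pvG order (k + 1)) +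
      pvS setup_times (pvG order k) (pvG order (k + 1))
def pvGk (order : List Int) (tasks_data : List (List Int)) (setup_times : List (List Int)) (k : Nat) : Int :=
  pvC order tasks_data setup_times k - pvDd tasks_data (pvG order k)
def pvL (order : List Int) (tasks_data : List (List Int)) (setup_times : List (List Int)) (k : Nat) : Int :=
  max 0 (pvGk order tasks_data setup_times k)
-- completion time of the PREVIOUS task (0 before the first)
def pvCPrev (order : List Int) (tasks_data : List (List Int)) (setup_times : List (List Int)) : Nat → Int
  | 0 => 0
  | k + 1 => pvC order tasks_data setup_times k
-- the task scheduled before index j (none before the first)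
def pvPrevOpt (order : List Int) : Nat → Option Int
  | 0 => none
  | k + 1 => some (pvG order k)
-- maximum of pvGk over the index window [j, j + f]
def sufMax (order : List Int) (tasks_data : List (List Int)) (setup_times : List (List Int)) : Nat → Nat → Int
  | 0, j => pvGk order tasks_data setup_times j
  | f + 1, j => max (pvGk order tasks_data setup_times j) (sufMax order tasks_data setup_times f (j + 1))

lemma getD_map_range_append (f : Nat → Int) (k j : Nat) (rest : List Int) (h : j < k) :
    ((List.range k).map f ++ rest).getD j 0 = f j := by
  rw [List.getD_eq_getElem?_getD, List.getElem?_append_left (by simpa using h)]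
  simp [List.getElem?_map, List.getElem?_range h]

lemma set_map_range_append (f : Nat → Int) (k n' : Nat) (h : 1 ≤ n') :
    (((List.range k).map f ++ List.replicate n' (0 : Int)).set k (f k))
      = (List.range (k + 1)).map f ++ List.replicate (n' - 1) 0 := by
  obtain ⟨m, rfl⟩ : ∃ m, n' = m + 1 := ⟨n' - 1, by omega⟩
  rw [List.replicate_succ, List.set_append_right _ _ (by simp),
      List.range_succ, List.map_append]
  simp

-- A's loop invariant: after the first k iterations the arrays hold pvC/pvL on [0,k) and 0 beyond.
lemma A_inv (order : List Int) (td st : List (List Int)) :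
    ∀ k, k ≤ order.length →
      (List.range k).foldl (fun acc (j : Nat) => calc_step order td st acc (Int.ofNat j))
          (List.replicate order.length (0 : Int), List.replicate order.length (0 : Int))
        = ((List.range k).map (pvC order td st) ++ List.replicate (order.length - k) 0,
           (List.range k).map (pvL order td st) ++ List.replicate (order.length - k) 0) := by
  intro k hk
  induction k with
  | zero => simp
  | succ j ih =>
    rw [List.range_succ, List.foldl_append, ih (by omega)]
    simp only [List.foldl_cons, List.foldl_nil]
    show calc_step order td st _ (Int.ofNat j) = _
    rw [← List.range_succ]
    unfold calc_step
    simp only [Int.ofNat_eq_natCast, PySem.List.pyGetD_natCast, PySem.List.pySetD_natCast]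
    cases j with
    | zero =>
      have hlt : ¬ ((0 : Int) < ((0 : Nat) : Int)) := by decide
      simp only [hlt, if_false]
      have e1 : (0 : Int) + PySem.List.pyGetD (PySem.List.pyGetD td (order.getD 0 0) []) 0 0 + 0
          = pvC order td st 0 := by simp [pvC, pvP, pvG]
      rw [e1]
      have e2 : max 0 (pvC order td st 0 - PySem.List.pyGetD (PySem.List.pyGetD td (order.getD 0 0) []) 1 0)
          = pvL order td st 0 := by simp [pvL, pvGk, pvDd, pvG]
      rw [e2]
      have s1 := set_map_range_append (pvC order td st) 0 order.length (by omega)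
      have s2 := set_map_range_append (pvL order td st) 0 order.length (by omega)
      exact Prod.ext s1 s2
    | succ i =>
      have hpos : (0 : Int) < ((i + 1 : Nat) : Int) := by exact_mod_cast Nat.succ_pos i
      simp only [hpos, if_true]
      have hcast : (((i + 1 : Nat) : Int)) - 1 = ((i : Nat) : Int) := by push_cast; ring
      rw [hcast]
      simp only [PySem.List.pyGetD_natCast]
      rw [getD_map_range_append (pvC order td st) (i + 1) i _ (by omega)]
      have e1 : pvC order td st i
          + PySem.List.pyGetD (PySem.List.pyGetD td (order.getD (i + 1) 0) []) 0 0
          + PySem.List.pyGetD (PySem.List.pyGetD st (order.getD i 0) []) (order.getD (i + 1) 0) 0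
          = pvC order td st (i + 1) := by simp [pvC, pvP, pvS, pvG]
      rw [e1]
      have e2 : max 0 (pvC order td st (i + 1)
          - PySem.List.pyGetD (PySem.List.pyGetD td (order.getD (i + 1) 0) []) 1 0)
          = pvL order td st (i + 1) := by simp [pvL, pvGk, pvDd, pvG]
      rw [e2]
      have s1 := set_map_range_append (pvC order td st) (i + 1) (order.length - (i + 1)) (by omega)
      have s2 := set_map_range_append (pvL order td st) (i + 1) (order.length - (i + 1)) (by omega)
      rw [show order.length - (i + 1) - 1 = order.length - (i + 1 + 1) by omega] at s1 s2
      exact Prod.ext s1 s2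

-- running max over a window of clamped latenesses
lemma foldA (order : List Int) (td st : List (List Int)) :
    ∀ f j (a : Int), (List.range' j (f + 1)).foldl (fun acc k => max acc (pvL order td st k)) a
      = max a (max 0 (sufMax order td st f j)) := by
  intro f
  induction f with
  | zero => intro j a; simp [List.range', pvL, sufMax]
  | succ f ih =>
    intro j a
    rw [List.range'_succ, List.foldl_cons, ih (j + 1) (max a (pvL order td st j))]
    show _ = max a (max 0 (max (pvGk order td st j) (sufMax order td st f (j + 1))))
    simp only [pvL]
    omega

-- the element of B's pair list at index j
lemma P_get (order : List Int) (j : Nat) (hj : j < ((none :: order.dropLast.map some).zip order).length) :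
    ((none :: order.dropLast.map some).zip order)[j] = (pvPrevOpt order j, pvG order j) := by
  have hjo : j < order.length := by
    have := hj; rw [List.length_zip] at this; omega
  rw [List.getElem_zip]
  refine Prod.ext ?_ ?_
  · cases j with
    | zero => rfl
    | succ k =>
      have hk : k < order.dropLast.length := by
        rw [List.length_dropLast]; omega
      simp only [List.getElem_cons_succ, List.getElem_map]
      rw [List.getElem_dropLast]
      simp [pvPrevOpt, pvG, List.getD_eq_getElem?_getD, List.getElem?_eq_getElem (by omega : k < order.length)]
  · simp [pvG, List.getD_eq_getElem?_getD, List.getElem?_eq_getElem hjo]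

-- the processing + setup increment of index j equals the completion-time step
lemma inc_eq (order : List Int) (td st : List (List Int)) (j : Nat) :
    pvP td (pvG order j) +
      (match pvPrevOpt order j with
       | some prev => PySem.List.pyGetD (PySem.List.pyGetD st prev []) (pvG order j) 0
       | none => 0)
      = pvC order td st j - pvCPrev order td st j := by
  cases j with
  | zero => simp [pvPrevOpt, pvC, pvCPrev]
  | succ k => simp [pvPrevOpt, pvC, pvCPrev, pvS]; ring

-- B's backward-scan invariant: the fold over the suffix of pairs from index j computes the
-- window maximum of latenesses relative to the completion time before index j.
lemma B_from (order : List Int) (td st : List (List Int)) :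
    ∀ fuel j, order.length = j + 1 + fuel →
      (((none :: order.dropLast.map some).zip order).drop j).foldr
          (fun pr acc => alt_step td st acc pr) none
        = some (sufMax order td st fuel j - pvCPrev order td st j) := by
  intro fuel
  induction fuel with
  | zero =>
    intro j hn
    have hlen : ((none :: order.dropLast.map some).zip order).length = order.length := by
      rw [List.length_zip, List.length_cons, List.length_map, List.length_dropLast]
      omega
    rw [List.drop_eq_getElem_cons (by omega : j < ((none :: order.dropLast.map some).zip order).length),
        List.drop_eq_nil_of_le (by omega), P_get order j (by omega)]
    simp only [List.foldr_cons, List.foldr_nil]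
    simp only [alt_step]
    congr 1
    have hinc := inc_eq order td st j
    simp only [sufMax, pvGk, pvP, pvDd] at hinc ⊢
    omega
  | succ f ih =>
    intro j hn
    have hlen : ((none :: order.dropLast.map some).zip order).length = order.length := by
      rw [List.length_zip, List.length_cons, List.length_map, List.length_dropLast]
      omega
    rw [List.drop_eq_getElem_cons (by omega : j < ((none :: order.dropLast.map some).zip order).length),
        List.foldr_cons, ih (j + 1) (by omega), P_get order j (by omega)]
    simp only [alt_step]
    have hcp : pvCPrev order td st (j + 1) = pvC order td st j := rfl
    rw [hcp]
    congr 1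
    have hinc := inc_eq order td st j
    simp only [sufMax, pvGk, pvP, pvDd] at hinc ⊢
    omega

-- ===== VERDICT (by name: the statement is the Claim_ definition above) =====
theorem calculate_Lmax_spec : Claim_equal_calculate_Lmax := by
  intro order td st _ hpre
  obtain ⟨hne, -, -⟩ := hpre
  unfold Spec_calculate_Lmax calculate_Lmax calculate_Lmax_alt
  dsimp only
  obtain ⟨m, hn⟩ : ∃ m, order.length = m + 1 :=
    ⟨order.length - 1, by cases order <;> simp_all⟩
  -- A side: fold over pyRange = fold over List.range, then the invariant at k = n
  rw [PySem.List.pyRange_one]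
  simp only [Int.sub_zero, Int.toNat_natCast, zero_add, List.foldl_map]
  have hA := A_inv order td st order.length le_rfl
  simp only [Int.ofNat_eq_natCast] at hA
  rw [hA]
  simp only [Nat.sub_self, List.replicate_zero, List.append_nil]
  -- B side: the backward-scan invariant at j = 0
  have hB := B_from order td st m 0 (by omega)
  rw [List.drop_zero] at hB
  rw [hB]
  simp only [Option.getD_some, pvCPrev, Int.sub_zero]
  -- A side: max(L) over the nonempty list of clamped latenesses is max 0 (sufMax m 0)
  rw [hn, List.range_eq_range', List.range'_succ, List.map_cons, PySem.List.max?_id_cons,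
      Option.getD_some, List.foldl_map]
  cases m with
  | zero => simp [List.range', pvL, sufMax]
  | succ f =>
    rw [foldA order td st f 1 (pvL order td st 0)]
    simp only [pvL, sufMax, Nat.zero_add]
    omega
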